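-- pv_equiv track=rewrite | github.com/isaacgrove/advent-of-code | day_11/day11_part2.py | look_left
-- ===== SOURCE A (Python) =====
-- def look_left(i,j,lst):
--     # all 8 of these return a 1 if you see an occupied seat, a 0 if you see an unoccupied seat
--     if j - 1 >= 0:
--         if lst[i][j-1] == 2:
--             return 1
--         elif lst[i][j-1] == 1:
--             return 0
--         else:
--             return look_left(i, j-1, lst)
--     else:
--         return 0
-- ===== SOURCE B (Python) =====
-- def look_left(i, j, lst):
--     # Scan the prefix of the row left of column j, nearest-first, and
--     # report the first seat found: occupied -> 1, empty -> 0, none -> 0.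
--     if j <= 0:
--         return 0
--     for v in reversed(lst[i][:j]):
--         if v == 2:
--             return 1
--         if v == 1:
--             return 0
--     return 0
-- ===== Notes on version B (the rewrite author's own statement) =====
-- stated objective: idiomatic
-- what changed: Replaces A's tail recursion on the column index with a slice of the row prefix scanned nearest-first by a for loop, returning at the first seat.
import Mathlib
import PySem

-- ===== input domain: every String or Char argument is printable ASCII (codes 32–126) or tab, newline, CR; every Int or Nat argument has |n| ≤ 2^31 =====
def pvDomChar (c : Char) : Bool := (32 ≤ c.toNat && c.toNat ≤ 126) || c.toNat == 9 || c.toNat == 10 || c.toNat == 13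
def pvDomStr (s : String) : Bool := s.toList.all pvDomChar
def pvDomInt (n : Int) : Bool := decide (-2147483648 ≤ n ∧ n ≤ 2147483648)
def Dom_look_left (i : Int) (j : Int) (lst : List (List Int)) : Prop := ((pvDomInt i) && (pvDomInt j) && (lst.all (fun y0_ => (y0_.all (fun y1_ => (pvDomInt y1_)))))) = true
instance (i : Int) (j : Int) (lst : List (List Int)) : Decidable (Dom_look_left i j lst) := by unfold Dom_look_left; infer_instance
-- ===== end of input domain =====

-- B replaces A's tail recursion by an iteration over the reversed row prefix (idiomatic; same cost).

-- ===== PORT A =====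
-- literal port of A's recursion; the 'none' arm is Python's IndexError, excluded by Pre_
def look_left (i : Int) (j : Int) (lst : List (List Int)) : Int :=
  if j - 1 ≥ 0 then
    match (PySem.List.pyGet? lst i).bind (fun row => PySem.List.pyGet? row (j - 1)) with
    | some v =>
      if v = 2 then 1
      else if v = 1 then 0
      else look_left i (j - 1) lst
    | none => 0
  else 0
termination_by j.toNat
decreasing_by omega

-- ===== PORT B =====
-- the 'for v in reversed(lst[i][:j])' loop of Source B
def lookScan : List Int → Int
  | [] => 0
  | v :: rest => if v = 2 then 1 else if v = 1 then 0 else lookScan rest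

def look_left_alt (i : Int) (j : Int) (lst : List (List Int)) : Int :=
  if j ≤ 0 then 0
  else
    match PySem.List.pyGet? lst i with
    | some row => lookScan (PySem.List.slice row (some 0) (some j)).reverse
    | none => 0   -- lst[i] raises in Source B; excluded by Pre_

-- ===== PRECONDITION & SPEC =====
-- Pre_ excludes exactly the inputs where A raises IndexError: when j ≥ 1, the row
-- index i must be valid and j must not exceed that row's length.
def Pre_look_left (i : Int) (j : Int) (lst : List (List Int)) : Prop :=
  1 ≤ j → (PySem.List.pyGet? lst i).any (fun row => j ≤ row.length) = true
instance (i : Int) (j : Int) (lst : List (List Int)) : Decidable (Pre_look_left i j lst) := by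
  unfold Pre_look_left; infer_instance

def pvWitness_look_left : Int × Int × List (List Int) := (0, 2, [[0, 2, 1]])

def Spec_look_left (i : Int) (j : Int) (lst : List (List Int)) (out : Int) : Prop := out = look_left_alt i j lst
instance (i : Int) (j : Int) (lst : List (List Int)) (out : Int) : Decidable (Spec_look_left i j lst out) := by unfold Spec_look_left; infer_instance

-- ===== CLAIM (what is proved, stated in full; the proofs are below) =====
def Claim_equal_look_left : Prop := ∀ (i : Int) (j : Int) (lst : List (List Int)), Dom_look_left i j lst → Pre_look_left i j lst → Spec_look_left i j lst (look_left i j lst)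

-- ===== LEMMAS AND PROOFS =====

-- core invariant: for a fixed valid row, A's recursion on column index n+1 computes
-- B's nearest-first scan of the reversed prefix of length n+1
theorem look_left_eq_scan (i : Int) (lst : List (List Int)) (row : List Int)
    (hrow : PySem.List.pyGet? lst i = some row) :
    ∀ (n : Nat), n < row.length →
      look_left i ((n : Int) + 1) lst = lookScan ((row.take (n + 1)).reverse) := by
  intro n
  induction n with
  | zero =>
    intro hn
    rw [look_left]
    have hc : ((0 : Nat) : Int) + 1 - 1 = ((0 : Nat) : Int) := by norm_num
    rw [hc]
    have h0 : PySem.List.pyGet? row ((0 : Nat) : Int) = some row[0] :=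
      PySem.List.pyGet?_ofNat (xs := row) (n := 0) hn
    simp only [hrow, Option.bind_some, h0]
    have htake : row.take 1 = [row[0]] := by
      cases row with
      | nil => simp at hn
      | cons a t => simp
    rw [if_pos (by positivity)]
    simp only [htake, List.reverse_singleton, lookScan]
    split_ifs with h1 h2
    all_goals first | rfl | (rw [look_left.eq_def]; norm_num)
  | succ m ih =>
    intro hn
    rw [look_left]
    have hm : m < row.length := by omega
    have hc : ((m + 1 : Nat) : Int) + 1 - 1 = ((m + 1 : Nat) : Int) := by push_cast; ring
    rw [hc]
    have h0 : PySem.List.pyGet? row ((m + 1 : Nat) : Int) = some row[m + 1] :=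
      PySem.List.pyGet?_ofNat (xs := row) (n := m + 1) hn
    simp only [hrow, Option.bind_some, h0]
    have htake : row.take (m + 1 + 1) = row.take (m + 1) ++ [row[m + 1]] := by
      rw [List.take_add_one]
      simp [List.getElem?_eq_getElem hn]
    rw [if_pos (by positivity)]
    rw [htake, List.reverse_append]
    simp only [List.reverse_singleton, List.singleton_append, lookScan]
    split_ifs with h1 h2
    · rfl
    · rfl
    · have hc2 : ((m + 1 : Nat) : Int) = ((m : Nat) : Int) + 1 := by push_cast; ring
      rw [hc2]
      exact ih hm

-- ===== VERDICT (by name: the statement is the Claim_ definition above) =====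
theorem look_left_spec : Claim_equal_look_left := by
  intro i j lst _ hpre
  unfold Spec_look_left look_left_alt
  by_cases hj : j ≤ 0
  · rw [if_pos hj, look_left, if_neg (by omega)]
  · rw [if_neg hj]
    have h1j : 1 ≤ j := by omega
    have hany := hpre h1j
    cases hrow : PySem.List.pyGet? lst i with
    | none => rw [hrow] at hany; simp [Option.any] at hany
    | some row =>
      rw [hrow] at hany
      simp only [Option.any_some, decide_eq_true_eq] at hany
      simp only []
      have hslice : PySem.List.slice row (some 0) (some j) = row.take j.toNat := by
        rw [PySem.List.slice_zero_start, PySem.List.slice_to row (by omega)]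
      rw [hslice]
      have hn : (j.toNat - 1) < row.length := by omega
      have hj' : j = ((j.toNat - 1 : Nat) : Int) + 1 := by omega
      have key := look_left_eq_scan i lst row hrow (j.toNat - 1) hn
      have hnat : (j.toNat - 1) + 1 = j.toNat := by omega
      rw [hnat] at key
      rw [← hj'] at key
      exact key
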